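-- pv_equiv track=rewrite | github.com/disputestrike/RELEASE-CRUCIB-2026 | backend/agents/repair_agents.py | _fix_js_brackets
-- ===== SOURCE A (Python) =====
-- def _fix_js_brackets(code: str) -> str:
--     """Try to balance brackets/braces in JS code."""
--     openers = {"(": ")", "[": "]", "{": "}"}
--     stack = []
--     in_string = False
--     string_char = None
--     escaped = False
--
--     for ch in code:
--         if escaped:
--             escaped = False
--             continue
--         if ch == "\\" and in_string:
--             escaped = True
--             continue
--         if in_string:
--             if ch == string_char:
--                 in_string = False
--             continue
--         if ch in ("'", '"', "`"):
--             in_string = True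
--             string_char = ch
--             continue
--         if ch in openers:
--             stack.append(ch)
--         elif ch in openers.values():
--             # Find matching opener
--             expected_opener = None
--             for op, cl in openers.items():
--                 if cl == ch:
--                     expected_opener = op
--                     break
--             if stack and stack[-1] == expected_opener:
--                 stack.pop()
--
--     # If unclosed brackets, add closers
--     if stack:
--         result = code
--         for opener in reversed(stack):
--             result += openers[opener]
--         return result
--
--     return code
-- ===== SOURCE B (Python) =====
-- def _fix_js_brackets(code: str) -> str:
--     """Balance JS brackets via staged passes: strip strings, then reduce
--     per-bracket summaries (exposed closers, residual openers) pairwise,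
--     divide-and-conquer style, instead of a single stack scan."""
--     closers = {"(": ")", "[": "]", "{": "}"}
--     # stage 1: remove string literals entirely
--     plain = []
--     i, n = 0, len(code)
--     while i < n:
--         ch = code[i]
--         i += 1
--         if ch in "'\"`":
--             while i < n:
--                 c = code[i]
--                 i += 1
--                 if c == "\\":
--                     i += 1
--                 elif c == ch:
--                     break
--         else:
--             plain.append(ch)
--     # stage 2: each bracket becomes a summary (exposed_closers, residual_openers)
--     items = [([ch], []) if ch in ")]}" else ([], [ch])
--              for ch in plain if ch in "()[]{}"]
--     # stage 3: pairwise merging rounds until one summary remains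
--     while len(items) > 1:
--         merged = []
--         for k in range(0, len(items) - 1, 2):
--             (c1, o1), (c2, o2) = items[k], items[k + 1]
--             stack = list(o1)  # residual openers of the left part, top = last
--             exposed = list(c1)
--             for c in c2:
--                 if stack:
--                     if closers[stack[-1]] == c:
--                         stack.pop()
--                 else:
--                     exposed.append(c)
--             merged.append((exposed, stack + o2))
--         if len(items) % 2:
--             merged.append(items[-1])
--         items = merged
--     residual = items[0][1] if items else []
--     return code + "".join(closers[o] for o in reversed(residual))
-- ===== Notes on version B (the rewrite author's own statement) =====
-- stated objective: alternative
-- what changed: Replaces A's single interleaved stack scan with staged passes: string literals are stripped first, each bracket becomes a summary (exposed closers, residual openers), and summaries are merged pairwise divide-and-conquer style until one remains, whose residual openers yield the appended closers.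
import Mathlib
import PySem

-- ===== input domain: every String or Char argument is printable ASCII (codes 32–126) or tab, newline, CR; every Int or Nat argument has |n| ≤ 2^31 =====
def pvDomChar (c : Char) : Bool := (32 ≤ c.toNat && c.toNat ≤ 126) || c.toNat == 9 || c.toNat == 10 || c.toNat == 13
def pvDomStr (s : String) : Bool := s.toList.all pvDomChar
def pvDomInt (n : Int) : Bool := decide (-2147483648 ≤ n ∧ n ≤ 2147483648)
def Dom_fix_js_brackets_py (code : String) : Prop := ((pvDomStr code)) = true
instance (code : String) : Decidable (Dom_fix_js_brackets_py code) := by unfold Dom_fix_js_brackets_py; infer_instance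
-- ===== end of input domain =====

-- B replaces A's single stack scan with staged passes: strip string literals,
-- then reduce per-bracket summaries (exposed closers, residual openers) by
-- pairwise divide-and-conquer merging (objective: alternative algorithm, same cost).

-- ===== PORT A =====
-- state: (stack, in_string, string_char, escaped); stack head = Python stack top
def pvStepA (st : List Char × Bool × Option Char × Bool) (ch : Char) :
    List Char × Bool × Option Char × Bool :=
  match st with
  | (stack, instr, sc, esc) =>
    if esc then (stack, instr, sc, false)
    else if ch == '\\' && instr then (stack, instr, sc, true)
    else if instr then
      if some ch == sc then (stack, false, sc, false) else (stack, instr, sc, false)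
    else if ch == '\'' || ch == '"' || ch == '`' then (stack, true, some ch, false)
    else if ch == '(' || ch == '[' || ch == '{' then (ch :: stack, instr, sc, false)
    else if ch == ')' || ch == ']' || ch == '}' then
      -- find matching opener, pop if it is on top
      let expected : Char := if ch == ')' then '(' else if ch == ']' then '[' else '{'
      match stack with
      | top :: rest => if top == expected then (rest, instr, sc, false) else (stack, instr, sc, false)
      | [] => (stack, instr, sc, false)
    else (stack, instr, sc, false)

def pvCloserA (c : Char) : Char := if c == '(' then ')' else if c == '[' then ']' else '}'

def fix_js_brackets_py (code : String) : String :=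
  let fin := code.toList.foldl pvStepA ([], false, none, false)
  let stack := fin.1
  if stack.isEmpty then code
  else code ++ String.ofList (stack.map pvCloserA)

-- ===== PORT B =====
def pvCloser (c : Char) : Char := if c == '(' then ')' else if c == '[' then ']' else '}'
def pvIsQuote (c : Char) : Bool := c == '\'' || c == '"' || c == '`'
def pvIsOpen (c : Char) : Bool := c == '(' || c == '[' || c == '{'
def pvIsClose (c : Char) : Bool := c == ')' || c == ']' || c == '}'
def pvIsBracket (c : Char) : Bool := pvIsOpen c || pvIsClose c

-- stage 1 inner while loop: skip the body of a string literal opened by quote q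
def pvSkipStr (q : Char) : List Char → List Char
  | [] => []
  | c :: rest =>
    if c == '\\' then
      match rest with
      | [] => []
      | _ :: r => pvSkipStr q r
    else if c == q then rest
    else pvSkipStr q rest

-- unfolding / length lemmas for pvSkipStr; pvSkipStr_len is cited by pvStrip's termination proof
theorem pvSkipStr_nil (q : Char) : pvSkipStr q [] = [] := by
  rw [pvSkipStr.eq_def]

theorem pvSkipStr_bs1 (q : Char) : pvSkipStr q ['\\'] = [] := by
  rw [pvSkipStr.eq_def]; simp

theorem pvSkipStr_bs (q d : Char) (r : List Char) :
    pvSkipStr q ('\\' :: d :: r) = pvSkipStr q r := by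
  rw [pvSkipStr.eq_def]; simp

theorem pvSkipStr_close (q c : Char) (rest : List Char)
    (h1 : (c == '\\') = false) (h2 : (c == q) = true) :
    pvSkipStr q (c :: rest) = rest := by
  rw [pvSkipStr.eq_def]; simp [h1, h2]

theorem pvSkipStr_step (q c : Char) (rest : List Char)
    (h1 : (c == '\\') = false) (h2 : (c == q) = false) :
    pvSkipStr q (c :: rest) = pvSkipStr q rest := by
  rw [pvSkipStr.eq_def]; simp [h1, h2]

theorem pvSkipStr_len_aux (q : Char) : ∀ (n : Nat) (l : List Char), l.length ≤ n →
    (pvSkipStr q l).length ≤ l.length := by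
  intro n
  induction n with
  | zero =>
    intro l hl
    have : l = [] := List.eq_nil_of_length_eq_zero (Nat.le_zero.mp hl)
    simp [this, pvSkipStr_nil]
  | succ n ih =>
    intro l hl
    match l with
    | [] => simp [pvSkipStr_nil]
    | c :: rest =>
      simp only [List.length_cons] at hl
      by_cases hb : c = '\\'
      · subst hb
        match rest with
        | [] => simp [pvSkipStr_bs1]
        | d :: r =>
          have := ih r (by simp at hl ⊢; omega)
          rw [pvSkipStr_bs]
          simp only [List.length_cons]
          omega
      · have hcb : (c == '\\') = false := by simp [hb]
        by_cases hq : c = q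
        · rw [pvSkipStr_close q c rest hcb (by simp [hq])]
          simp
        · have hcq : (c == q) = false := by simp [hq]
          have := ih rest (by omega)
          rw [pvSkipStr_step q c rest hcb hcq]
          simp only [List.length_cons]
          omega

theorem pvSkipStr_len (q : Char) (l : List Char) : (pvSkipStr q l).length ≤ l.length :=
  pvSkipStr_len_aux q l.length l le_rfl

-- stage 1 outer while loop: remove string literals entirely
def pvStrip : List Char → List Char
  | [] => []
  | c :: rest =>
    if pvIsQuote c then pvStrip (pvSkipStr c rest)
    else c :: pvStrip rest
termination_by l => l.length
decreasing_by
  · exact Nat.lt_succ_of_le (pvSkipStr_len _ _)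
  · simp

-- a summary: (exposed closers in order, residual openers with TOP AT HEAD —
-- the Lean mirror of Python's top-at-end list, read reversed)
def pvBase (c : Char) : List Char × List Char :=
  if pvIsClose c then ([c], []) else ([], [c])

-- body of 'for c in c2': pop the stack top on a match, else the closer acts later (exposed)
def pvMergeStep (st : List Char × List Char) (c : Char) : List Char × List Char :=
  match st with
  | (t :: s, ex) => if pvCloser t == c then (s, ex) else (t :: s, ex)
  | ([], ex) => ([], ex ++ [c])

def pvCombine (p q : List Char × List Char) : List Char × List Char :=
  let r := q.1.foldl pvMergeStep (p.2, p.1)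
  (r.2, q.2 ++ r.1)

-- one pairwise merging round (Python's inner for over range(0, len-1, 2) plus odd leftover)
def pvPass : List (List Char × List Char) → List (List Char × List Char)
  | a :: b :: rest => pvCombine a b :: pvPass rest
  | l => l

-- cited by pvReduce's termination proof
theorem pvPass_len : ∀ (l : List (List Char × List Char)), (pvPass l).length ≤ l.length
  | [] => by rw [pvPass.eq_def]
  | [a] => by rw [pvPass.eq_def]
  | a :: b :: rest => by
      rw [pvPass.eq_def]
      simp only [List.length_cons]
      have := pvPass_len rest
      omega

-- Python's 'while len(items) > 1'
def pvReduce : List (List Char × List Char) → List Char × List Char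
  | [] => ([], [])
  | [s] => s
  | a :: b :: rest => pvReduce (pvPass (a :: b :: rest))
termination_by l => l.length
decreasing_by
  · have := pvPass_len rest
    simp only [pvPass, List.length_cons]
    omega

def fix_js_brackets_py_alt (code : String) : String :=
  let toks := (pvStrip code.toList).filter pvIsBracket
  let res := pvReduce (toks.map pvBase)
  code ++ String.ofList (res.2.map pvCloser)

-- ===== PRECONDITION & SPEC =====
def Spec_fix_js_brackets_py (code : String) (out : String) : Prop := out = fix_js_brackets_py_alt code
instance (code : String) (out : String) : Decidable (Spec_fix_js_brackets_py code out) := by unfold Spec_fix_js_brackets_py; infer_instance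

-- ===== CLAIM (what is proved, stated in full; the proofs are below) =====
def Claim_equal_fix_js_brackets_py : Prop := ∀ (code : String), Dom_fix_js_brackets_py code → Spec_fix_js_brackets_py code (fix_js_brackets_py code)

-- ===== LEMMAS AND PROOFS =====

-- semantic bridge: bracket-only stack step (B's matching test), and the action
-- of a summary on an incoming stack (top at head)
def pvStepBr (s : List Char) (c : Char) : List Char :=
  if pvIsOpen c then c :: s
  else if pvIsClose c then
    match s with
    | t :: s' => if pvCloser t == c then s' else t :: s'
    | [] => []
  else s

def pvDropC : List Char → List Char → List Char
  | [], s => s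
  | c :: cs, t :: s' => pvDropC cs (if pvCloser t == c then s' else t :: s')
  | _ :: cs, [] => pvDropC cs []

def pvApply (p : List Char × List Char) (s : List Char) : List Char :=
  p.2 ++ pvDropC p.1 s

def pvApplyAll (l : List (List Char × List Char)) (s : List Char) : List Char :=
  l.foldl (fun s p => pvApply p s) s

-- structural form of the merge loop: (remaining stack, newly exposed closers)
def pvLoop : List Char → List Char → List Char × List Char
  | [], o => (o, [])
  | c :: cs, t :: o => pvLoop cs (if pvCloser t == c then o else t :: o)
  | c :: cs, [] => ((pvLoop cs []).1, c :: (pvLoop cs []).2)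

theorem pvDropC_nilstack : ∀ (cs : List Char), pvDropC cs [] = []
  | [] => rfl
  | _ :: cs => pvDropC_nilstack cs

theorem pvLoop_nilstack : ∀ (cs : List Char), pvLoop cs [] = ([], cs)
  | [] => rfl
  | c :: cs => by simp [pvLoop, pvLoop_nilstack cs]

theorem pvFoldl_merge : ∀ (cs o ex0 : List Char),
    List.foldl pvMergeStep (o, ex0) cs = ((pvLoop cs o).1, ex0 ++ (pvLoop cs o).2) := by
  intro cs
  induction cs with
  | nil => intro o ex0; simp [pvLoop]
  | cons c cs ih =>
    intro o ex0
    match o with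
    | t :: o' =>
      simp only [List.foldl, pvMergeStep, pvLoop]
      by_cases h : (pvCloser t == c) = true
      · simp [h, ih]
      · simp only [Bool.not_eq_true] at h
        simp [h, ih]
    | [] =>
      simp only [List.foldl, pvMergeStep, pvLoop_nilstack]
      rw [ih [] (ex0 ++ [c]), pvLoop_nilstack]
      simp

theorem pvDrop_split : ∀ (cs o r : List Char),
    pvDropC cs (o ++ r) = (pvLoop cs o).1 ++ pvDropC (pvLoop cs o).2 r := by
  intro cs
  induction cs with
  | nil => intro o r; simp [pvDropC, pvLoop]
  | cons c cs ih =>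
    intro o r
    match o with
    | t :: o' =>
      simp only [List.cons_append, pvDropC, pvLoop]
      by_cases h : (pvCloser t == c) = true
      · rw [if_pos h, if_pos h, ih]
      · simp only [Bool.not_eq_true] at h
        rw [if_neg (by simp [h]), if_neg (by simp [h]), ← List.cons_append, ih]
    | [] =>
      rw [pvLoop_nilstack]
      simp [pvDropC]

theorem pvDropC_append : ∀ (a b s : List Char),
    pvDropC (a ++ b) s = pvDropC b (pvDropC a s) := by
  intro a
  induction a with
  | nil => intro b s; simp [pvDropC]
  | cons c cs ih =>
    intro b s
    match s with
    | t :: s' => simp only [List.cons_append, pvDropC]; rw [ih]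
    | [] => simp only [List.cons_append, pvDropC]; rw [ih]

theorem pvCombine_correct (p q : List Char × List Char) (s : List Char) :
    pvApply (pvCombine p q) s = pvApply q (pvApply p s) := by
  obtain ⟨c1, o1⟩ := p
  obtain ⟨c2, o2⟩ := q
  simp only [pvCombine, pvApply, pvFoldl_merge]
  rw [pvDropC_append, pvDrop_split c2 o1 (pvDropC c1 s)]
  simp [List.append_assoc]

theorem pvPass_correct : ∀ (l : List (List Char × List Char)) (s : List Char),
    pvApplyAll (pvPass l) s = pvApplyAll l s
  | [], s => rfl
  | [a], s => rfl
  | a :: b :: rest, s => by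
      simp only [pvPass, pvApplyAll, List.foldl]
      rw [show ∀ x, List.foldl (fun s p => pvApply p s) x (pvPass rest)
            = pvApplyAll (pvPass rest) x from fun _ => rfl]
      rw [pvPass_correct rest, pvCombine_correct]
      rfl

theorem pvReduce_correct : ∀ (l : List (List Char × List Char)) (s : List Char),
    pvApply (pvReduce l) s = pvApplyAll l s
  | [], s => by simp [pvReduce, pvApply, pvDropC, pvApplyAll]
  | [p], s => by simp [pvReduce, pvApplyAll, List.foldl]
  | a :: b :: rest, s => by
      rw [pvReduce]
      have hlen : (pvPass (a :: b :: rest)).length < (a :: b :: rest).length := by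
        have := pvPass_len rest
        simp only [pvPass, List.length_cons]
        omega
      rw [pvReduce_correct (pvPass (a :: b :: rest)) s, pvPass_correct]
termination_by l => l.length
decreasing_by
  · have := pvPass_len rest
    simp only [pvPass, List.length_cons]
    omega

theorem pvBase_correct (c : Char) (s : List Char) (h : pvIsBracket c = true) :
    pvApply (pvBase c) s = pvStepBr s c := by
  simp only [pvIsBracket, Bool.or_eq_true] at h
  rcases h with h | h
  · have hno : pvIsClose c = false := by
      simp only [pvIsOpen, Bool.or_eq_true, beq_iff_eq] at h
      rcases h with (h | h) | h <;> subst h <;> rfl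
    simp [pvBase, pvApply, pvStepBr, h, hno, pvDropC]
  · have hno : pvIsOpen c = false := by
      simp only [pvIsClose, Bool.or_eq_true, beq_iff_eq] at h
      rcases h with (h | h) | h <;> subst h <;> rfl
    simp only [pvBase, h, pvApply, pvStepBr, hno, Bool.false_eq_true,
      if_false, if_true, List.nil_append]
    match s with
    | [] => simp [pvDropC, pvDropC_nilstack]
    | t :: s' => simp [pvDropC]

theorem pvMapBase_correct : ∀ (toks : List Char) (s : List Char),
    (∀ c ∈ toks, pvIsBracket c = true) →
    pvApplyAll (toks.map pvBase) s = List.foldl pvStepBr s toks := by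
  intro toks
  induction toks with
  | nil => intro s _; rfl
  | cons c cs ih =>
    intro s h
    simp only [List.map, pvApplyAll, List.foldl]
    rw [show ∀ x, List.foldl (fun s p => pvApply p s) x (cs.map pvBase)
          = pvApplyAll (cs.map pvBase) x from fun _ => rfl]
    rw [ih _ (fun c hc => h c (List.mem_cons_of_mem _ hc)),
        pvBase_correct c s (h c (List.mem_cons_self))]

theorem pvStepBr_skip (s : List Char) (c : Char) (h : pvIsBracket c = false) :
    pvStepBr s c = s := by
  simp only [pvIsBracket, Bool.or_eq_false_iff] at h
  simp [pvStepBr, h.1, h.2]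

theorem pvFilter_correct : ∀ (l s : List Char),
    List.foldl pvStepBr s (l.filter pvIsBracket) = List.foldl pvStepBr s l := by
  intro l
  induction l with
  | nil => intro s; rfl
  | cons c cs ih =>
    intro s
    by_cases h : pvIsBracket c = true
    · simp only [List.filter_cons, h, if_pos rfl, List.foldl]
      exact ih _
    · simp only [Bool.not_eq_true] at h
      simp only [List.filter_cons, h, Bool.false_eq_true, if_false, List.foldl,
        pvStepBr_skip s c h]
      exact ih _

-- matching tests of A and B agree on opener stack tops
theorem pvTest_agree (t c : Char) (ht : pvIsOpen t = true) (hc : pvIsClose c = true) :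
    (t == (if c == ')' then '(' else if c == ']' then '[' else '{')) = (pvCloser t == c) := by
  simp only [pvIsOpen, pvIsClose, Bool.or_eq_true, beq_iff_eq] at ht hc
  rcases ht with (h | h) | h <;> rcases hc with (h' | h') | h' <;> subst h <;> subst h' <;> decide

-- A's fold while inside a string equals A's fold restarted after the body B strips
theorem pvStr_aux (n : Nat) : ∀ (l : List Char), l.length ≤ n → ∀ (s : List Char) (q : Char),
    (List.foldl pvStepA (s, true, some q, false) l).1
      = (List.foldl pvStepA (s, false, some q, false) (pvSkipStr q l)).1 := by
  induction n with
  | zero =>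
    intro l hl s q
    have : l = [] := List.eq_nil_of_length_eq_zero (Nat.le_zero.mp hl)
    simp [this, pvSkipStr]
  | succ n ih =>
    intro l hl s q
    match l with
    | [] => simp [pvSkipStr]
    | c :: rest =>
      simp only [List.length_cons] at hl
      by_cases hb : c = '\\'
      · subst hb
        match rest with
        | [] => simp [List.foldl, pvStepA, pvSkipStr_bs1]
        | d :: r =>
          have hr : r.length ≤ n := by simp at hl ⊢; omega
          rw [pvSkipStr_bs]
          have h2 : List.foldl pvStepA (s, true, some q, false) ('\\' :: d :: r)
              = List.foldl pvStepA (s, true, some q, false) r := by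
            simp [List.foldl, pvStepA]
          rw [h2]
          exact ih r hr s q
      · have hcb : (c == '\\') = false := by simp [hb]
        by_cases hq : c = q
        · subst hq
          rw [pvSkipStr_close c c rest hcb (by simp)]
          simp [List.foldl, pvStepA, hcb]
        · have hcq : (c == q) = false := by simp [hq]
          have hrest : rest.length ≤ n := by omega
          rw [pvSkipStr_step q c rest hcb hcq]
          have h2 : List.foldl pvStepA (s, true, some q, false) (c :: rest)
              = List.foldl pvStepA (s, true, some q, false) rest := by
            simp [List.foldl, pvStepA, hcb, hcq]
          rw [h2]
          exact ih rest hrest s q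

-- A's fold outside a string computes the bracket fold over the stripped text
theorem pvMain (n : Nat) : ∀ (l : List Char), l.length ≤ n → ∀ (s : List Char) (sc : Option Char),
    (∀ x ∈ s, pvIsOpen x = true) →
    (List.foldl pvStepA (s, false, sc, false) l).1 = List.foldl pvStepBr s (pvStrip l) := by
  induction n with
  | zero =>
    intro l hl s sc _
    have : l = [] := List.eq_nil_of_length_eq_zero (Nat.le_zero.mp hl)
    simp [this, pvStrip]
  | succ n ih =>
    intro l hl s sc hinv
    match l with
    | [] => simp [pvStrip]
    | c :: rest =>
      simp only [List.length_cons] at hl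
      have hrest : rest.length ≤ n := by omega
      by_cases hqu : c = '\'' ∨ c = '"' ∨ c = '`'
      · have hq : pvIsQuote c = true := by
          rcases hqu with h|h|h <;> simp [pvIsQuote, h]
        have hstep : List.foldl pvStepA (s, false, sc, false) (c :: rest)
            = List.foldl pvStepA (s, true, some c, false) rest := by
          rcases hqu with h|h|h <;> subst h <;> simp [List.foldl, pvStepA]
        rw [hstep, pvStrip, if_pos hq, pvStr_aux rest.length rest le_rfl s c]
        exact ih (pvSkipStr c rest) (le_trans (pvSkipStr_len c rest) hrest) s (some c) hinv
      · have hq : pvIsQuote c = false := by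
          simp only [pvIsQuote, Bool.or_eq_false_iff, beq_eq_false_iff_ne, ne_eq]
          push_neg at hqu
          exact ⟨⟨hqu.1, hqu.2.1⟩, hqu.2.2⟩
        rw [pvStrip, if_neg (by simp [hq])]
        simp only [List.foldl]
        by_cases hop : c = '(' ∨ c = '[' ∨ c = '{'
        · have ho : pvIsOpen c = true := by
            rcases hop with h|h|h <;> simp [pvIsOpen, h]
          have hstepA : pvStepA (s, false, sc, false) c = (c :: s, false, sc, false) := by
            rcases hop with h|h|h <;> subst h <;> simp [pvStepA]
          have hstepB : pvStepBr s c = c :: s := by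
            simp [pvStepBr, ho]
          rw [hstepA, hstepB]
          exact ih rest hrest (c :: s) sc
            (by intro x hx; rcases List.mem_cons.mp hx with h|h
                · subst h; exact ho
                · exact hinv x h)
        · have ho : pvIsOpen c = false := by
            simp only [pvIsOpen, Bool.or_eq_false_iff, beq_eq_false_iff_ne, ne_eq]
            push_neg at hop
            exact ⟨⟨hop.1, hop.2.1⟩, hop.2.2⟩
          by_cases hcl : c = ')' ∨ c = ']' ∨ c = '}'
          · have hc : pvIsClose c = true := by
              rcases hcl with h|h|h <;> simp [pvIsClose, h]
            match s with
            | [] =>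
              have hstepA : pvStepA (([] : List Char), false, sc, false) c
                  = (([] : List Char), false, sc, false) := by
                rcases hcl with h|h|h <;> subst h <;> simp [pvStepA]
              have hstepB : pvStepBr [] c = [] := by
                simp [pvStepBr, ho, hc]
              rw [hstepA, hstepB]
              exact ih rest hrest [] sc (by intro x hx; cases hx)
            | top :: s' =>
              have htop : pvIsOpen top = true := hinv top List.mem_cons_self
              have hagree := pvTest_agree top c htop hc
              have hinv' : ∀ x ∈ s', pvIsOpen x = true :=
                fun x hx => hinv x (List.mem_cons_of_mem _ hx)
              by_cases ht : (pvCloser top == c) = true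
              · have hstepA : pvStepA (top :: s', false, sc, false) c = (s', false, sc, false) := by
                  have hmatch : (top == (if c == ')' then '(' else if c == ']' then '[' else '{')) = true := by
                    rw [hagree]; exact ht
                  rcases hcl with h|h|h <;> subst h <;>
                    simp only [pvStepA] <;>
                    simp_all
                have hstepB : pvStepBr (top :: s') c = s' := by
                  simp [pvStepBr, ho, hc, ht]
                rw [hstepA, hstepB]
                exact ih rest hrest s' sc hinv'
              · have hstepA : pvStepA (top :: s', false, sc, false) c = (top :: s', false, sc, false) := by
                  have hmatch : (top == (if c == ')' then '(' else if c == ']' then '[' else '{')) = false := by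
                    rw [hagree]; simpa using ht
                  rcases hcl with h|h|h <;> subst h <;>
                    simp only [pvStepA] <;>
                    simp_all
                have hstepB : pvStepBr (top :: s') c = top :: s' := by
                  simp only [Bool.not_eq_true] at ht
                  simp [pvStepBr, ho, hc, ht]
                rw [hstepA, hstepB]
                exact ih rest hrest (top :: s') sc hinv
          · have hc : pvIsClose c = false := by
              simp only [pvIsClose, Bool.or_eq_false_iff, beq_eq_false_iff_ne, ne_eq]
              push_neg at hcl
              exact ⟨⟨hcl.1, hcl.2.1⟩, hcl.2.2⟩
            have hnq : ¬((c == '\'' || c == '"' || c == '`') = true) := by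
              simp only [pvIsQuote] at hq; simp [hq]
            have hno : ¬((c == '(' || c == '[' || c == '{') = true) := by
              simp only [pvIsOpen] at ho; simp [ho]
            have hnc : ¬((c == ')' || c == ']' || c == '}') = true) := by
              simp only [pvIsClose] at hc; simp [hc]
            have hstepA : pvStepA (s, false, sc, false) c = (s, false, sc, false) := by
              simp only [pvStepA]
              rw [if_neg (by simp), if_neg (by simp), if_neg (by simp),
                  if_neg hnq, if_neg hno, if_neg hnc]
            have hstepB : pvStepBr s c = s := pvStepBr_skip s c (by simp [pvIsBracket, ho, hc])
            rw [hstepA, hstepB]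
            exact ih rest hrest s sc hinv

-- ===== VERDICT (by name: the statement is the Claim_ definition above) =====
theorem fix_js_brackets_py_spec : Claim_equal_fix_js_brackets_py := by
  intro code _
  unfold Spec_fix_js_brackets_py fix_js_brackets_py fix_js_brackets_py_alt
  have hstack : (List.foldl pvStepA ([], false, none, false) code.toList).1
      = (pvReduce (((pvStrip code.toList).filter pvIsBracket).map pvBase)).2 := by
    rw [pvMain code.toList.length code.toList le_rfl [] none (by intro x hx; cases hx)]
    rw [← pvFilter_correct (pvStrip code.toList) []]
    rw [← pvMapBase_correct _ [] (fun c hc => (List.mem_filter.mp hc).2)]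
    rw [← pvReduce_correct]
    simp [pvApply, pvDropC_nilstack]
  have hcl : pvCloserA = pvCloser := rfl
  simp only [hstack, hcl]
  by_cases h : ((pvReduce (((pvStrip code.toList).filter pvIsBracket).map pvBase)).2).isEmpty
  · rw [if_pos h, List.isEmpty_iff.mp h]
    simp
  · rw [if_neg h]
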